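-- pv_equiv track=rewrite | github.com/dnyansagar/gene_regulatory_network | processing/memeParser.py | merge_family_motif_counts
-- ===== SOURCE A (Python) =====
-- def merge_family_motif_counts(dictionary, preDict): # Approach 1
--     new_dict = dict()
--     for k, v in dictionary.items():
--         names = [name for name, seq in preDict.items() if k in seq]
--         if names !=[]:
--             if names[0] in new_dict: new_dict[names[0]] += int(v)
--             else: new_dict[names[0]] = int(v)
--         else:
--             if "others" in new_dict: new_dict["others"] += int(v)
--             else: new_dict["others"] = int(v)
--     return new_dict
-- ===== SOURCE B (Python) =====
-- def merge_family_motif_counts(dictionary, preDict):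
--     # Invert preDict once: motif -> first family name whose sequence contains it.
--     family_of = {}
--     for name, seq in preDict.items():
--         for motif in seq:
--             if motif not in family_of:
--                 family_of[motif] = name
--     new_dict = {}
--     for k, v in dictionary.items():
--         fam = family_of.get(k, "others")
--         new_dict[fam] = new_dict.get(fam, 0) + int(v)
--     return new_dict
-- ===== Notes on version B (the rewrite author's own statement) =====
-- stated objective: faster
-- what changed: B builds an inverted index (motif -> first family) once and then does a single dictionary lookup per count, instead of rescanning all of preDict's sequences for every dictionary key.
import Mathlib
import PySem

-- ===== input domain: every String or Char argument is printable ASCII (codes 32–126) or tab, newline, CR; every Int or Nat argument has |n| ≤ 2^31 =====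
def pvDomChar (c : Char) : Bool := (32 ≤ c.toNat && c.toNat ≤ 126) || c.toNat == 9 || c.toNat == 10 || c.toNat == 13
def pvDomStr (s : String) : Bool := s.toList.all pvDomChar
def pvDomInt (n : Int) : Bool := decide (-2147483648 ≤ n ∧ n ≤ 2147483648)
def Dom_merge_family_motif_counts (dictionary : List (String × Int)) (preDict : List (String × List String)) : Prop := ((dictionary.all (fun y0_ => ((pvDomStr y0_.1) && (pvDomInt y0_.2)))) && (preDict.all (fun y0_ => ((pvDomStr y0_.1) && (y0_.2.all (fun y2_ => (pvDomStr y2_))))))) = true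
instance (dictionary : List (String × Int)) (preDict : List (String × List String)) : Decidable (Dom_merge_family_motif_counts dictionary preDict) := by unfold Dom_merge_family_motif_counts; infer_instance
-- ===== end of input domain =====

-- B builds an inverted index (motif -> first family) once, then one lookup per dictionary entry,
-- instead of A's rescan of all of preDict for every dictionary key.

-- ===== PORT A =====
-- for k, v in dictionary.items(): names = [...]; then the four-way branch, literally.
def merge_family_motif_counts (dictionary : List (String × Int)) (preDict : List (String × List String)) : List (String × Int) :=
  (dictionary.foldl (fun new_dict kv =>
    let names := (preDict.filter (fun p => p.2.contains kv.1)).map Prod.fst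
    match names with
    | n :: _ =>
        if new_dict.contains n then new_dict.insert n (new_dict.getD n 0 + kv.2)
        else new_dict.insert n kv.2
    | [] =>
        if new_dict.contains "others" then new_dict.insert "others" (new_dict.getD "others" 0 + kv.2)
        else new_dict.insert "others" kv.2)
    PySem.Dict.empty).items

-- ===== PORT B =====
def merge_family_motif_counts_alt (dictionary : List (String × Int)) (preDict : List (String × List String)) : List (String × Int) :=
  let family_of : PySem.Dict String String :=
    preDict.foldl (fun fo p =>
      p.2.foldl (fun fo motif => if fo.contains motif then fo else fo.insert motif p.1) fo)
      PySem.Dict.empty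
  (dictionary.foldl (fun new_dict kv =>
    let fam := (family_of.get? kv.1).getD "others"
    new_dict.insert fam (new_dict.getD fam 0 + kv.2))
    PySem.Dict.empty).items

-- ===== PRECONDITION & SPEC =====
def Spec_merge_family_motif_counts (dictionary : List (String × Int)) (preDict : List (String × List String)) (out : List (String × Int)) : Prop := out = merge_family_motif_counts_alt dictionary preDict
instance (dictionary : List (String × Int)) (preDict : List (String × List String)) (out : List (String × Int)) : Decidable (Spec_merge_family_motif_counts dictionary preDict out) := by unfold Spec_merge_family_motif_counts; infer_instance

-- ===== CLAIM (what is proved, stated in full; the proofs are below) =====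
def Claim_equal_merge_family_motif_counts : Prop := ∀ (dictionary : List (String × Int)) (preDict : List (String × List String)), Dom_merge_family_motif_counts dictionary preDict → Spec_merge_family_motif_counts dictionary preDict (merge_family_motif_counts dictionary preDict)

-- ===== LEMMAS AND PROOFS =====

-- first family name whose sequence contains k, in preDict order
def pvFirstFam (preDict : List (String × List String)) (k : String) : Option String :=
  ((preDict.filter (fun p => p.2.contains k)).map Prod.fst).head?

-- the inner "insert if absent" loop over one sequence
theorem pvInner_get? (seq : List String) (name : String) (fo : PySem.Dict String String) (k : String) :
    (seq.foldl (fun fo motif => if fo.contains motif then fo else fo.insert motif name) fo).get? k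
      = match fo.get? k with
        | some v => some v
        | none => if seq.contains k then some name else none := by
  induction seq generalizing fo with
  | nil => cases h : fo.get? k <;> simp [h]
  | cons m rest ih =>
    simp only [List.foldl_cons]
    rw [ih]
    cases hc : fo.contains m with
    | true =>
      rw [if_pos rfl]
      cases hfk : fo.get? k with
      | some v => simp
      | none =>
        have hkm : ¬ k = m := by
          intro h
          subst h
          rw [PySem.Dict.contains_eq_isSome_get?, hfk] at hc
          simp at hc
        simp [hkm]
    | false =>
      rw [if_neg (by simp)]
      rw [PySem.Dict.get?_insert]
      by_cases hk : k = m
      · subst hk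
        have hfk : fo.get? k = none := by
          rw [PySem.Dict.contains_eq_isSome_get?] at hc
          cases h : fo.get? k <;> simp [h] at hc ⊢
        simp [hfk]
      · simp [hk]

-- the whole index build: lookup = first matching family
theorem pvIndex_get? (preDict : List (String × List String)) (fo : PySem.Dict String String) (k : String) :
    (preDict.foldl (fun fo p =>
        p.2.foldl (fun fo motif => if fo.contains motif then fo else fo.insert motif p.1) fo) fo).get? k
      = match fo.get? k with
        | some v => some v
        | none => pvFirstFam preDict k := by
  induction preDict generalizing fo with
  | nil => cases h : fo.get? k <;> simp [h, pvFirstFam]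
  | cons p rest ih =>
    simp only [List.foldl_cons]
    rw [ih, pvInner_get?]
    cases hfk : fo.get? k with
    | some v => simp
    | none =>
      by_cases hm : k ∈ p.2
      · simp [hm, pvFirstFam]
      · simp [hm, pvFirstFam]

-- A's four-way branch collapses to B's single insert
theorem pvBump (d : PySem.Dict String Int) (key : String) (v : Int) :
    (if d.contains key then d.insert key (d.getD key 0 + v) else d.insert key v)
      = d.insert key (d.getD key 0 + v) := by
  by_cases h : d.contains key = true
  · simp [h]
  · have h' : d.contains key = false := by simpa using h
    rw [PySem.Dict.getD_of_not_contains (h := h')]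
    simp [h', zero_add]

theorem pvSteps_eq (preDict : List (String × List String)) :
    ∀ (new_dict : PySem.Dict String Int) (kv : String × Int),
      (let names := (preDict.filter (fun p => p.2.contains kv.1)).map Prod.fst
       match names with
       | n :: _ =>
           if new_dict.contains n then new_dict.insert n (new_dict.getD n 0 + kv.2)
           else new_dict.insert n kv.2
       | [] =>
           if new_dict.contains "others" then new_dict.insert "others" (new_dict.getD "others" 0 + kv.2)
           else new_dict.insert "others" kv.2)
      = (let fam := (pvFirstFam preDict kv.1).getD "others"
         new_dict.insert fam (new_dict.getD fam 0 + kv.2)) := by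
  intro d kv
  simp only [pvFirstFam]
  cases h : (preDict.filter (fun p => p.2.contains kv.1)).map Prod.fst with
  | nil => simp [pvBump]
  | cons n rest => simp [pvBump]

theorem merge_family_motif_counts_spec : Claim_equal_merge_family_motif_counts := by
  intro dictionary preDict _
  unfold Spec_merge_family_motif_counts merge_family_motif_counts merge_family_motif_counts_alt
  congr 1
  apply PySem.List.foldl_congr_mem
  intro d kv _
  rw [pvSteps_eq preDict d kv]
  simp only [pvIndex_get? preDict PySem.Dict.empty kv.1, PySem.Dict.get?_empty]
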